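-- pv_equiv track=rewrite | github.com/dlrgroupcomputationaldesign/PointCloudPostProcess-LETR | src/post_process_endpt.py | sorted_merged_floor_ceiling_plane
-- ===== SOURCE A (Python) =====
-- def sorted_merged_floor_ceiling_plane(bbox_arr):
--     sorted_data = sorted(bbox_arr, key=lambda x: x[1]) #sort by zmin
--
--     # Create the result array
--     plane_arr = []
--     i = 0
--     while i < len(sorted_data):
--         current = sorted_data[i]
--
--         if current[0] == 'ceiling' and i + 1 < len(sorted_data):
--             next_item = sorted_data[i + 1]
--             if next_item[0] == 'floor':
--                 # Merge ceiling and next floor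
--                 z_min = min(current[1], next_item[1])
--                 z_max = max(current[2], next_item[2])
--                 plane_arr.append([z_min, z_max])
--                 i += 2  # Skip both
--                 continue
--
--         # Otherwise, just add the current one
--         plane_arr.append([current[1], current[2]])
--         i += 1
--     return plane_arr
-- ===== SOURCE B (Python) =====
-- def _with_neighbors(s):
--     # list of (prev, cur, next) triples, None at the ends
--     triples = []
--     prev = None
--     for i, cur in enumerate(s):
--         nxt = s[i + 1] if i + 1 < len(s) else None
--         triples.append((prev, cur, nxt))
--         prev = cur
--     return triples
--
--
-- def sorted_merged_floor_ceiling_plane(bbox_arr):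
--     # Stateless local rule: since the second element of a merge is a 'floor' and
--     # the first a 'ceiling', greedy adjacent merges can never overlap or chain,
--     # so each element's fate depends only on its immediate neighbours:
--     # merge if 'ceiling' followed by 'floor', drop a 'floor' preceded by a
--     # 'ceiling', otherwise emit the element itself.
--     s = sorted(bbox_arr, key=lambda x: x[1])
--     out = []
--     for prev, cur, nxt in _with_neighbors(s):
--         if cur[0] == 'ceiling' and nxt is not None and nxt[0] == 'floor':
--             out.append([min(cur[1], nxt[1]), max(cur[2], nxt[2])])
--         elif not (cur[0] == 'floor' and prev is not None and prev[0] == 'ceiling'):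
--             out.append([cur[1], cur[2]])
--     return out
-- ===== Notes on version B (the rewrite author's own statement) =====
-- stated objective: alternative
-- what changed: Replaces A's stateful index loop with skip-two consumption by a stateless local rule over (prev,cur,next) neighbour triples, justified by the fact that greedy ceiling/floor merges can never overlap or chain: merge a 'ceiling' with a following 'floor', drop a 'floor' after a 'ceiling', else emit the element.
import Mathlib
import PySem

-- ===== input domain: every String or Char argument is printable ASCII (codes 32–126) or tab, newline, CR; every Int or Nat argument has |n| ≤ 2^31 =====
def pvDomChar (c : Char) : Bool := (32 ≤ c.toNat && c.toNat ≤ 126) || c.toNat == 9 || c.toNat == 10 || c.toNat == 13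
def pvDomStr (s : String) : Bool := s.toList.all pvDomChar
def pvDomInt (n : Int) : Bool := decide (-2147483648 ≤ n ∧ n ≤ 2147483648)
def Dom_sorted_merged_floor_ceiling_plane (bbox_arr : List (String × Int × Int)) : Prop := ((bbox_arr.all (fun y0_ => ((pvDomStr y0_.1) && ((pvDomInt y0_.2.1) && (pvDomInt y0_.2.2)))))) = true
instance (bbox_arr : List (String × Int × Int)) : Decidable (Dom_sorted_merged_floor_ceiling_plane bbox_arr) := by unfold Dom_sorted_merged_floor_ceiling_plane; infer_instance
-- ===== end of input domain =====

-- B replaces A's stateful skip-two loop by a stateless local rule on neighbour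
-- triples — sound because greedy ceiling/floor merges never overlap (objective: alternative).

-- ===== PORT A =====
-- A's while loop over the sorted list: looks at sorted_data[i] and sorted_data[i+1],
-- merges a 'ceiling' followed by a 'floor' and skips both (i += 2), else emits one.
def pvAuxA : List (String × Int × Int) → List (List Int)
  | [] => []
  | [c] => [[c.2.1, c.2.2]]
  | c :: n :: rest =>
    if c.1 == "ceiling" && n.1 == "floor" then
      [min c.2.1 n.2.1, max c.2.2 n.2.2] :: pvAuxA rest
    else
      [c.2.1, c.2.2] :: pvAuxA (n :: rest)

def sorted_merged_floor_ceiling_plane (bbox_arr : List (String × Int × Int)) : List (List Int) :=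
  pvAuxA (PySem.List.sorted bbox_arr (fun x => x.2.1) false)

-- ===== PORT B =====
-- Source B's _with_neighbors: the list of (prev, cur, next) triples, none at the ends.
def pvWithNeighbors : Option (String × Int × Int) → List (String × Int × Int) →
    List (Option (String × Int × Int) × (String × Int × Int) × Option (String × Int × Int))
  | _, [] => []
  | p, c :: rest => (p, c, rest.head?) :: pvWithNeighbors (some c) rest

-- Source B's loop body: what one triple contributes to the output.
def pvEmit (p : Option (String × Int × Int)) (cur : String × Int × Int)
    (nxt : Option (String × Int × Int)) : List (List Int) :=
  if cur.1 == "ceiling" && (match nxt with | some n => n.1 == "floor" | none => false) then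
    match nxt with
    | some n => [[min cur.2.1 n.2.1, max cur.2.2 n.2.2]]
    | none => []
  else if !(cur.1 == "floor" && (match p with | some q => q.1 == "ceiling" | none => false)) then
    [[cur.2.1, cur.2.2]]
  else []

def sorted_merged_floor_ceiling_plane_alt (bbox_arr : List (String × Int × Int)) : List (List Int) :=
  (pvWithNeighbors none (PySem.List.sorted bbox_arr (fun x => x.2.1) false)).flatMap
    (fun t => pvEmit t.1 t.2.1 t.2.2)

-- ===== PRECONDITION & SPEC =====
def Spec_sorted_merged_floor_ceiling_plane (bbox_arr : List (String × Int × Int)) (out : List (List Int)) : Prop := out = sorted_merged_floor_ceiling_plane_alt bbox_arr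
instance (bbox_arr : List (String × Int × Int)) (out : List (List Int)) : Decidable (Spec_sorted_merged_floor_ceiling_plane bbox_arr out) := by unfold Spec_sorted_merged_floor_ceiling_plane; infer_instance

-- ===== CLAIM (what is proved, stated in full; the proofs are below) =====
def Claim_equal_sorted_merged_floor_ceiling_plane : Prop := ∀ (bbox_arr : List (String × Int × Int)), Dom_sorted_merged_floor_ceiling_plane bbox_arr → Spec_sorted_merged_floor_ceiling_plane bbox_arr (sorted_merged_floor_ceiling_plane bbox_arr)

-- ===== LEMMAS AND PROOFS =====
-- 'p is a safe previous element for list s': the head of s is not a 'floor'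
-- that a preceding 'ceiling' p would have consumed.
def pvSafe (p : Option (String × Int × Int)) (s : List (String × Int × Int)) : Bool :=
  match p, s with
  | some q, c :: _ => !(q.1 == "ceiling" && c.1 == "floor")
  | _, _ => true

theorem pvFlatMap_eq_auxA (s : List (String × Int × Int)) :
    ∀ p, pvSafe p s = true →
      (pvWithNeighbors p s).flatMap (fun t => pvEmit t.1 t.2.1 t.2.2) = pvAuxA s := by
  induction s using pvAuxA.induct with
  | case1 => intro p _; rfl
  | case2 c =>
    intro p hp
    simp only [pvWithNeighbors, List.flatMap_cons, List.flatMap_nil, pvAuxA, pvEmit,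
      List.head?_nil, List.append_nil]
    cases p with
    | none => simp
    | some q =>
      simp only [pvSafe, Bool.not_eq_true'] at hp
      simp only [Bool.and_eq_false_iff, beq_eq_false_iff_ne, ne_eq] at hp
      simp
      intro h1 h2
      rcases hp with hp | hp
      · exact hp h2
      · exact hp h1
  | case3 c n rest h ih =>
    intro p hp
    have hc : c.1 == "ceiling" := by
      cases hh : (c.1 == "ceiling") <;> simp [hh] at h ⊢
    have hn : n.1 == "floor" := by
      cases hh : (n.1 == "floor") <;> simp [hh] at h ⊢
    simp only [pvWithNeighbors, List.flatMap_cons, pvAuxA, h, if_true]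
    -- first triple: the merged pair
    have e1 : pvEmit p c (n :: rest).head? = [[min c.2.1 n.2.1, max c.2.2 n.2.2]] := by
      simp [pvEmit, hc, hn]
    -- second triple: the consumed floor contributes nothing
    have e2 : pvEmit (some c) n rest.head? = [] := by
      have hnc : (n.1 == "ceiling") = false := by
        cases hh : (n.1 == "ceiling")
        · rfl
        · exfalso
          have h1 := (beq_iff_eq ..).1 hn
          have h2 := (beq_iff_eq ..).1 hh
          simp [h1] at h2
      simp [pvEmit, hnc, hn, hc]
    rw [e1, e2]
    simp only [List.nil_append]
    rw [List.cons_append, List.nil_append]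
    congr 1
    exact ih (some n) (by
      cases rest with
      | nil => rfl
      | cons r rs =>
        have hnc : (n.1 == "ceiling") = false := by
          cases hh : (n.1 == "ceiling")
          · rfl
          · exfalso
            have h1 := (beq_iff_eq ..).1 hn
            have h2 := (beq_iff_eq ..).1 hh
            simp [h1] at h2
        simp [pvSafe, hnc])
  | case4 c n rest h ih =>
    intro p hp
    have hmerge : (c.1 == "ceiling" && n.1 == "floor") = false := by
      cases hh : (c.1 == "ceiling" && n.1 == "floor")
      · rfl
      · exact absurd hh (by simp [h])
    simp only [pvWithNeighbors, List.flatMap_cons, pvAuxA, h, if_false, Bool.false_eq_true]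
    have e1 : pvEmit p c (n :: rest).head? = [[c.2.1, c.2.2]] := by
      cases p with
      | none => simp [pvEmit, List.head?_cons, hmerge]
      | some q =>
        simp only [pvSafe, Bool.not_eq_true'] at hp
        simp only [Bool.and_eq_false_iff, beq_eq_false_iff_ne, ne_eq] at hp
        simp [pvEmit, List.head?_cons, hmerge]
        intro h1 h2
        rcases hp with hp | hp
        · exact hp h2
        · exact hp h1
    rw [e1]
    rw [List.cons_append, List.nil_append]
    congr 1
    exact ih (some c) (by
      show (!(c.1 == "ceiling" && n.1 == "floor")) = true
      simp [hmerge])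

-- ===== VERDICT (by name: the statement is the Claim_ definition above) =====
theorem sorted_merged_floor_ceiling_plane_spec : Claim_equal_sorted_merged_floor_ceiling_plane := by
  intro bbox_arr _
  unfold Spec_sorted_merged_floor_ceiling_plane sorted_merged_floor_ceiling_plane
    sorted_merged_floor_ceiling_plane_alt
  rw [pvFlatMap_eq_auxA _ none rfl]
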